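-- pv_equiv track=rewrite | github.com/Frankwii/data_mining_2 | src/clustering.py | _process_singleton_labels
-- ===== SOURCE A (Python) =====
-- def _process_singleton_labels(labels: list[int]) -> list[int]:
--     """
--     In some algorithms, a label of -1 signifies that the element forms a
--     singleton cluster. For our purposes, we wish to assign a unique label
--     to that element.
--     """
--     singleton_cluster_indices = list(
--         map(
--             lambda t: t[0],
--             filter(lambda t: t[1]==-1, enumerate(labels))
--         )
--     )
--
--     unique_labels = set(labels)
--
--     maximum_label = max(unique_labels)
--
--     new_singleton_labels = dict(map(
--         lambda t: (t[1], t[0] + maximum_label),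
--         enumerate(singleton_cluster_indices)
--     ))
--
--     return [new_singleton_labels[i] if labels[i]==-1 else labels[i] for i in range(len(labels))]
-- ===== SOURCE B (Python) =====
-- def _process_singleton_labels(labels: list[int]) -> list[int]:
--     """
--     Single streaming pass: each -1 gets the next unused label, counting
--     up from max(labels).
--     """
--     next_label = max(labels)
--     out = []
--     for label in labels:
--         if label == -1:
--             out.append(next_label)
--             next_label += 1
--         else:
--             out.append(label)
--     return out
-- ===== Notes on version B (the rewrite author's own statement) =====
-- stated objective: simpler
-- what changed: Replaced A's build-singleton-index-list + enumerate-based relabeling dict + index-based comprehension with one streaming pass over labels that keeps a running next_label counter starting at max(labels). Constant-factor speedup: no intermediate index list, dict or per-element dict lookup.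
import Mathlib
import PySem

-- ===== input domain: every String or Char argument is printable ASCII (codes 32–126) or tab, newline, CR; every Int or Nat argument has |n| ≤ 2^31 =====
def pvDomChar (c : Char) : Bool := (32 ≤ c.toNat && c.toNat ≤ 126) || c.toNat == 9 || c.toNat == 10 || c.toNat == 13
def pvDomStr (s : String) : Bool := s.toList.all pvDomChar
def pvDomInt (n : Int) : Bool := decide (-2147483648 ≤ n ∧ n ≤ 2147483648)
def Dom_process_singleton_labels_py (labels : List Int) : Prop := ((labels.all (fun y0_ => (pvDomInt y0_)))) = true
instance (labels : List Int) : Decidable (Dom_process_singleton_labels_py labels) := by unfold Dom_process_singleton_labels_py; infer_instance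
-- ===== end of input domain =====

-- B replaces A's singleton-index list + relabeling dict + indexed comprehension with one
-- streaming pass keeping a running next-label counter (objective: simpler; same O(n) cost).

-- ===== PORT A =====
def process_singleton_labels_py (labels : List Int) : List Int :=
  let singleton_cluster_indices : List Int :=
    ((PySem.List.enumerate labels).filter (fun t => t.2 == -1)).map (fun t => t.1)
  let unique_labels : PySem.Set Int := PySem.Set.ofList labels
  -- max(unique_labels): under Pre_ (labels ≠ []) max? is some; the .getD 0 default is never taken
  let maximum_label : Int := (PySem.List.max? unique_labels (fun x => x)).getD 0
  let new_singleton_labels : PySem.Dict Int Int :=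
    PySem.Dict.ofList ((PySem.List.enumerate singleton_cluster_indices).map
      (fun t => (t.2, t.1 + maximum_label)))
  -- labels[i] for i in range(len(labels)) is always in range, so pyGetD's default is never taken;
  -- new_singleton_labels[i] is only read when labels[i] == -1, where the key is present (no KeyError)
  (PySem.List.pyRange 0 labels.length 1).map (fun i =>
    if PySem.List.pyGetD labels i 0 == -1 then (new_singleton_labels.get? i).getD 0
    else PySem.List.pyGetD labels i 0)

-- ===== PORT B =====
def process_singleton_labels_py_alt (labels : List Int) : List Int :=
  -- max(labels): under Pre_ (labels ≠ []) max? is some; the .getD 0 default is never taken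
  let next_label : Int := (PySem.List.max? labels (fun x => x)).getD 0
  (labels.foldl (fun s label =>
      if label == -1 then (s.1 + 1, s.2 ++ [s.1]) else (s.1, s.2 ++ [label]))
    (next_label, ([] : List Int))).2

-- ===== PRECONDITION & SPEC =====
-- Pre_ excludes exactly the empty list, on which A's max() raises ValueError.
def Pre_process_singleton_labels_py (labels : List Int) : Prop := labels ≠ []
instance (labels : List Int) : Decidable (Pre_process_singleton_labels_py labels) := by
  unfold Pre_process_singleton_labels_py; infer_instance

def pvWitness_process_singleton_labels_py : List Int := [3, -1, -1, 2]

def Spec_process_singleton_labels_py (labels : List Int) (out : List Int) : Prop :=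
  out = process_singleton_labels_py_alt labels
instance (labels : List Int) (out : List Int) : Decidable (Spec_process_singleton_labels_py labels out) := by
  unfold Spec_process_singleton_labels_py; infer_instance

-- ===== CLAIM (what is proved, stated in full; the proofs are below) =====
def Claim_equal_process_singleton_labels_py : Prop :=
  ∀ (labels : List Int), Dom_process_singleton_labels_py labels →
    Pre_process_singleton_labels_py labels →
    Spec_process_singleton_labels_py labels (process_singleton_labels_py labels)

-- ===== LEMMAS AND PROOFS =====

-- the pure shape of B's loop: relabel head-first with a running counter
def pvRelab (next : Int) : List Int → List Int
  | [] => []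
  | x :: xs => if x = -1 then next :: pvRelab (next + 1) xs else x :: pvRelab next xs

theorem pvFoldB (labels : List Int) (next : Int) (acc : List Int) :
    (labels.foldl (fun s label =>
        if label == -1 then (s.1 + 1, s.2 ++ [s.1]) else (s.1, s.2 ++ [label]))
      (next, acc)).2 = acc ++ pvRelab next labels := by
  induction labels generalizing next acc with
  | nil => simp [pvRelab]
  | cons x xs ih =>
    rw [List.foldl_cons]
    by_cases hx : x = -1
    · rw [if_pos (by simpa using hx), ih]
      simp [pvRelab, hx]
    · rw [if_neg (by simpa using hx), ih]
      simp [pvRelab, hx]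


theorem pvRelab_length (next : Int) (labels : List Int) :
    (pvRelab next labels).length = labels.length := by
  induction labels generalizing next with
  | nil => rfl
  | cons x xs ih => by_cases hx : x = -1 <;> simp [pvRelab, hx, ih]

theorem pvRelab_getElem (labels : List Int) (next : Int) (i : Nat) (h : i < labels.length) :
    (pvRelab next labels)[i]'(by rw [pvRelab_length]; exact h) =
      if labels[i] = -1 then next + ((labels.take i).countP (fun x => x == -1) : Int)
      else labels[i] := by
  induction labels generalizing next i with
  | nil => simp at h
  | cons x xs ih =>
    cases i with
    | zero => by_cases hx : x = -1 <;> simp [pvRelab, hx]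
    | succ j =>
      have hj : j < xs.length := by simpa using h
      by_cases hx : x = -1
      · have hr : pvRelab next (x :: xs) = next :: pvRelab (next + 1) xs := by
          simp [pvRelab, hx]
        simp only [hr, List.getElem_cons_succ, List.take_succ_cons, List.countP_cons]
        rw [ih (next + 1) j hj]
        by_cases hy : xs[j] = -1
        · simp [hy, hx]; ring
        · simp [hy, hx]
      · have hr : pvRelab next (x :: xs) = x :: pvRelab next xs := by
          simp [pvRelab, hx]
        simp only [hr, List.getElem_cons_succ, List.take_succ_cons, List.countP_cons]
        rw [ih next j hj]
        by_cases hy : xs[j] = -1 <;> simp [hy, hx]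

-- both maxima are the same value (max of a list and of its dedup)
theorem pvMaxEq (labels : List Int) (h : labels ≠ []) :
    (PySem.List.max? (PySem.Set.ofList labels) (fun x => x)).getD 0 =
      (PySem.List.max? labels (fun x => x)).getD 0 := by
  obtain ⟨x, xs, rfl⟩ := List.exists_cons_of_ne_nil h
  have h1 : PySem.Set.ofList (x :: xs) ≠ [] := by
    intro hc
    have := (PySem.Set.mem_ofList (x :: xs) x).mpr (by simp)
    rw [hc] at this; simp at this
  rcases h2 : PySem.List.max? (PySem.Set.ofList (x :: xs)) (fun x => x) with _ | m₁
  · exact absurd ((PySem.List.max?_eq_none_iff _ _).mp h2) h1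
  rcases h3 : PySem.List.max? (x :: xs) (fun x => x) with _ | m₂
  · exact absurd ((PySem.List.max?_eq_none_iff _ _).mp h3) h
  have hm₁ : m₁ ∈ x :: xs := (PySem.Set.mem_ofList _ _).mp (PySem.List.max?_mem h2)
  have hm₂ : m₂ ∈ PySem.Set.ofList (x :: xs) := (PySem.Set.mem_ofList _ _).mpr (PySem.List.max?_mem h3)
  have le1 : m₁ ≤ m₂ := PySem.List.max?_isMax h3 m₁ hm₁
  have le2 : m₂ ≤ m₁ := PySem.List.max?_isMax h2 m₂ hm₂
  simp [le_antisymm le1 le2]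

-- the relabeling dict's items are exactly the built pair list (fresh, distinct keys)
theorem pvDictItems (idxs : List Int) (mx : Int) (hnd : idxs.Nodup) :
    (PySem.Dict.ofList ((PySem.List.enumerate idxs).map (fun t => (t.2, t.1 + mx)))).items =
      (PySem.List.enumerate idxs).map (fun t => (t.2, t.1 + mx)) := by
  have hkeys : (((PySem.List.enumerate idxs).map (fun t => (t.2, t.1 + mx))).map Prod.fst).Nodup := by
    rw [List.map_map]
    have h := PySem.List.map_snd_enumerate idxs (0 : Int)
    simp only [Function.comp_def]
    rw [h]
    exact hnd
  have := PySem.Dict.items_foldl_insert_fresh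
    ((PySem.List.enumerate idxs).map (fun t => (t.2, t.1 + mx)))
    Prod.fst Prod.snd PySem.Dict.empty
    (by intro a _; simp [PySem.Dict.contains_empty]) hkeys
  simpa [PySem.Dict.ofList, PySem.Dict.update] using this

-- lookup in the pair list built from enumerate = position in idxs, shifted
theorem pvDictLookup (idxs : List Int) (mx : Int) (s i : Int) :
    (PySem.Dict.mk ((PySem.List.enumerate idxs s).map (fun t => (t.2, t.1 + mx)))).get? i =
      (PySem.List.index? idxs i).map (fun k => s + (k : Int) + mx) := by
  induction idxs generalizing s with
  | nil => simp [PySem.List.enumerate_nil, PySem.Dict.get?, PySem.List.index?]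
  | cons x xs ih =>
    rw [PySem.List.enumerate_cons]
    by_cases hx : x = i
    · subst hx
      rw [List.map_cons, PySem.Dict.get?_mk_cons, PySem.List.index?_cons_self]
      simp
    · rw [List.map_cons, PySem.Dict.get?_mk_cons]
      simp only [show ((x == i) = false) from beq_eq_false_iff_ne.mpr hx, Bool.false_eq_true, if_false]
      rw [ih (s + 1), PySem.List.index?_cons_of_ne _ hx]
      cases PySem.List.index? xs i with
      | none => simp
      | some k => simp; ring

-- the singleton-index list is the filtered index range
theorem pvIdxsEq (labels : List Int) :
    ((PySem.List.enumerate labels).filter (fun t => t.2 == -1)).map (fun t => t.1) =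
      (PySem.List.pyRange 0 labels.length 1).filter
        (fun j => PySem.List.pyGetD labels j 0 == -1) := by
  rw [PySem.List.enumerate_eq_map_pyRange labels 0, List.filter_map, List.map_map]
  simp [Function.comp_def]

-- position of an index i in the filtered range = number of earlier hits
theorem pvIndexCount (P : Int → Bool) (i b : Int) (hb : i < b) (hP : P i = true) :
    ∀ (n : Nat) (a : Int), (i - a).toNat = n → a ≤ i →
      PySem.List.index? ((PySem.List.pyRange a b 1).filter P) i =
        some ((PySem.List.pyRange a i 1).filter P).length := by
  intro n
  induction n with
  | zero =>
    intro a hn ha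
    have hai : a = i := by omega
    subst hai
    rw [PySem.List.pyRange_one_cons hb, List.filter_cons_of_pos hP,
      PySem.List.index?_cons_self]
    simp [PySem.List.pyRange_one_eq_nil (le_refl a)]
  | succ n ih =>
    intro a hn ha
    have hai : a < i := by omega
    rw [PySem.List.pyRange_one_cons (by omega : a < b), PySem.List.pyRange_one_cons hai]
    by_cases hPa : P a = true
    · rw [List.filter_cons_of_pos hPa, List.filter_cons_of_pos hPa,
        PySem.List.index?_cons_of_ne _ (by omega : a ≠ i),
        ih (a + 1) (by omega) (by omega)]
      simp
    · rw [List.filter_cons_of_neg (by simpa using hPa),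
        List.filter_cons_of_neg (by simpa using hPa)]
      exact ih (a + 1) (by omega) (by omega)

-- the filtered-range count = countP of the prefix
theorem pvCountTake (labels : List Int) (i : Nat) (hi : i ≤ labels.length) :
    ((PySem.List.pyRange 0 (i : Int) 1).filter
        (fun j => PySem.List.pyGetD labels j 0 == -1)).length =
      (labels.take i).countP (fun x => x == -1) := by
  induction i with
  | zero => simp [PySem.List.pyRange_one_eq_nil (le_refl (0 : Int))]
  | succ n ih =>
    have hn : n < labels.length := by omega
    rw [show ((n + 1 : Nat) : Int) = (n : Int) + 1 by push_cast; ring,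
      PySem.List.pyRange_one_succ_right (by positivity), List.filter_append,
      List.length_append, ih (by omega),
      List.take_add_one, List.countP_append]
    have hgd : PySem.List.pyGetD labels (n : Int) 0 = labels[n] := by
      rw [PySem.List.pyGetD_natCast]; exact List.getD_eq_getElem labels 0 hn
    by_cases hy : labels[n] = -1 <;>
      simp [hgd, hy, List.getElem?_eq_getElem hn]

-- ===== VERDICT (by name: the statement is the Claim_ definition above) =====
theorem process_singleton_labels_py_spec : Claim_equal_process_singleton_labels_py := by
  intro labels _ hpre
  unfold Spec_process_singleton_labels_py process_singleton_labels_py process_singleton_labels_py_alt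
  dsimp only
  rw [pvFoldB, pvMaxEq labels hpre]
  set mx : Int := (PySem.List.max? labels (fun x => x)).getD 0 with hmx
  rw [pvIdxsEq]
  set P : Int → Bool := fun j => PySem.List.pyGetD labels j 0 == -1 with hP
  set idxs : List Int := (PySem.List.pyRange 0 labels.length 1).filter P with hidxs
  have hnd : idxs.Nodup := (PySem.List.nodup_pyRange_one 0 labels.length).filter P
  apply List.ext_getElem
  · simp [PySem.List.length_pyRange_one, pvRelab_length]
  · intro i h1 h2
    have hiL : i < labels.length := by
      simpa [PySem.List.length_pyRange_one] using h1
    have hrange : (PySem.List.pyRange 0 (labels.length : Int) 1)[i]'(by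
        simpa [PySem.List.length_pyRange_one] using hiL) = (i : Int) := by
      rw [PySem.List.getElem_pyRange_one]; simp
    rw [List.getElem_map, hrange]
    simp only [List.nil_append]
    rw [pvRelab_getElem labels mx i hiL]
    have hget : PySem.List.pyGetD labels (i : Int) 0 = labels[i] := by
      rw [PySem.List.pyGetD_natCast]
      exact List.getD_eq_getElem labels 0 hiL
    by_cases hneg : labels[i] = -1
    · have hPi : P (i : Int) = true := by simp [hP, hget, hneg]
      have hDict := pvDictItems idxs mx hnd
      have : PySem.Dict.ofList ((PySem.List.enumerate idxs).map (fun t => (t.2, t.1 + mx))) =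
          PySem.Dict.mk ((PySem.List.enumerate idxs).map (fun t => (t.2, t.1 + mx))) := by
        apply PySem.Dict.ext; rw [hDict]
      rw [hget, if_pos (by simp [hneg]), if_pos hneg, this, pvDictLookup,
        pvIndexCount P (i : Int) labels.length (by exact_mod_cast hiL) hPi ((i : Int) - 0).toNat 0 rfl (by positivity),
        pvCountTake labels i (le_of_lt hiL)]
      simp; ring
    · rw [hget, if_neg (by simp [hneg]), if_neg hneg]
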